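-- pv_equiv track=rewrite | github.com/akashtiwari2770/log_analysis_tool | app/analyze_logs.py | suggest_solutions
-- ===== SOURCE A (Python) =====
-- def suggest_solutions(analysis):
--     solutions = []
--     patterns = [item['pattern'].lower() for item in analysis.get('error_patterns', [])]
--     if any(pat for pat in patterns if 'connect' in pat or 'timeout' in pat):
--         solutions.append({
--             'problem': 'Connection issues',
--             'solution': 'Check network settings, server availability, and timeouts.'
--         })
--     if any(pat for pat in patterns if 'permission' in pat or 'denied' in pat):
--         solutions.append({
--             'problem': 'Permission issues',
--             'solution': 'Check file and system permissions, user roles, and ACLs.'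
--         })
--     if any(pat for pat in patterns if 'memory' in pat or 'cpu' in pat or 'disk' in pat):
--         solutions.append({
--             'problem': 'System resource limits',
--             'solution': 'Monitor and upgrade resource usage: RAM, CPU, storage.'
--         })
--     if not solutions:
--         solutions.append({
--             'problem': 'Uncategorized errors',
--             'solution': 'Check logs manually. Consider refining component configs.'
--         })
--     return solutions
-- ===== SOURCE B (Python) =====
-- _SOLUTIONS = [
--     {'problem': 'Connection issues',
--      'solution': 'Check network settings, server availability, and timeouts.'},
--     {'problem': 'Permission issues',
--      'solution': 'Check file and system permissions, user roles, and ACLs.'},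
--     {'problem': 'System resource limits',
--      'solution': 'Monitor and upgrade resource usage: RAM, CPU, storage.'},
-- ]
-- _KEYWORDS = [('connect', 0), ('timeout', 0), ('permission', 1), ('denied', 1),
--              ('memory', 2), ('cpu', 2), ('disk', 2)]
--
--
-- def suggest_solutions(analysis):
--     matched = set()
--     for item in analysis.get('error_patterns', []):
--         pat = item['pattern'].lower()
--         for kw, idx in _KEYWORDS:
--             if kw in pat:
--                 matched.add(idx)
--     if matched:
--         return [_SOLUTIONS[i] for i in sorted(matched)]
--     return [{'problem': 'Uncategorized errors',
--              'solution': 'Check logs manually. Consider refining component configs.'}]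
-- ===== Notes on version B (the rewrite author's own statement) =====
-- stated objective: alternative
-- what changed: B inverts the traversal: instead of three staged any-scans of the pattern list (one per category), it makes a single pass over the patterns against a flat keyword->category-id table, accumulates the matched category ids in a set, and finally emits the solution dicts indexed by the sorted ids (sortedness reproduces A's fixed append order); the fallback fires when the set is empty.
import Mathlib
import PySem

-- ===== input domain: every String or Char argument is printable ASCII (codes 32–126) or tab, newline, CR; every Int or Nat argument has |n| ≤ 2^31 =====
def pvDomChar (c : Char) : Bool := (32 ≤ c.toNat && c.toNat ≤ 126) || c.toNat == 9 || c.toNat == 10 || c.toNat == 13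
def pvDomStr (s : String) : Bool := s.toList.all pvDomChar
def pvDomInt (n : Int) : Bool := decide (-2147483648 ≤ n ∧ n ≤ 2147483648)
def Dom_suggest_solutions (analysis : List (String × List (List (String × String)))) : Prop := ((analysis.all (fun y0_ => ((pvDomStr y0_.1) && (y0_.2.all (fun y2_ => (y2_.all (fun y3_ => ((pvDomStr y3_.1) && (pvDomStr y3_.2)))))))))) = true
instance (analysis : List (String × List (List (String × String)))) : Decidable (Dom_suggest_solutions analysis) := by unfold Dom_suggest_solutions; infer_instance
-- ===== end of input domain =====

-- One line: B replaces A's three staged any-scans of the pattern list by a single pass that collects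
-- matched category ids in a set against a flat keyword table, then emits the solutions in sorted-id
-- order (objective: alternative); return values proved equal on Pre_.

-- first-match lookup in an association list (= Python dict lookup under the type convention)
def pvLookup {β : Type} (d : List (String × β)) (k : String) : Option β :=
  (d.find? (fun p => p.1 == k)).map (·.2)

-- the four dict literals both programs build
def pvConn : List (String × String) :=
  [("problem", "Connection issues"),
   ("solution", "Check network settings, server availability, and timeouts.")]
def pvPerm : List (String × String) :=
  [("problem", "Permission issues"),
   ("solution", "Check file and system permissions, user roles, and ACLs.")]
def pvRes : List (String × String) :=
  [("problem", "System resource limits"),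
   ("solution", "Monitor and upgrade resource usage: RAM, CPU, storage.")]
def pvUncat : List (String × String) :=
  [("problem", "Uncategorized errors"),
   ("solution", "Check logs manually. Consider refining component configs.")]

-- ===== PORT A =====
-- 'any(pat for pat in patterns if cond)' tests truthiness of pat among those with cond: && !(pat == "")
def suggest_solutions (analysis : List (String × List (List (String × String)))) : List (List (String × String)) :=
  let patterns := ((pvLookup analysis "error_patterns").getD []).map
    (fun item => PySem.Str.lower ((pvLookup item "pattern").getD ""))
  let solutions : List (List (String × String)) := []
  let solutions := if patterns.any (fun pat =>
      (PySem.Str.isIn "connect" pat || PySem.Str.isIn "timeout" pat) && !(pat == ""))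
    then solutions ++ [pvConn] else solutions
  let solutions := if patterns.any (fun pat =>
      (PySem.Str.isIn "permission" pat || PySem.Str.isIn "denied" pat) && !(pat == ""))
    then solutions ++ [pvPerm] else solutions
  let solutions := if patterns.any (fun pat =>
      (PySem.Str.isIn "memory" pat || PySem.Str.isIn "cpu" pat || PySem.Str.isIn "disk" pat) && !(pat == ""))
    then solutions ++ [pvRes] else solutions
  let solutions := if solutions.isEmpty then solutions ++ [pvUncat] else solutions
  solutions

-- ===== PORT B =====
def pvSolutions : List (List (String × String)) := [pvConn, pvPerm, pvRes]
def pvKeywords : List (String × Int) :=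
  [("connect", 0), ("timeout", 0), ("permission", 1), ("denied", 1),
   ("memory", 2), ("cpu", 2), ("disk", 2)]

-- _SOLUTIONS[i]: ids in matched are always 0..2 so pyGet? is some; .getD [] is unreachable
def suggest_solutions_alt (analysis : List (String × List (List (String × String)))) : List (List (String × String)) :=
  let matched : PySem.Set Int :=
    ((pvLookup analysis "error_patterns").getD []).foldl (fun m item =>
      let pat := PySem.Str.lower ((pvLookup item "pattern").getD "")
      pvKeywords.foldl (fun m kp => if PySem.Str.isIn kp.1 pat then PySem.Set.add m kp.2 else m) m)
      PySem.Set.empty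
  if !matched.isEmpty then
    (PySem.List.sorted matched (fun x => x) false).map (fun i => (PySem.List.pyGet? pvSolutions i).getD [])
  else [pvUncat]

-- ===== PRECONDITION & SPEC =====
-- Pre_ excludes exactly the inputs where item['pattern'] raises KeyError in Python
-- (some dict in the 'error_patterns' list has no 'pattern' key); both A and B raise there.
def Pre_suggest_solutions (analysis : List (String × List (List (String × String)))) : Prop :=
  (((pvLookup analysis "error_patterns").getD []).all
    (fun item => (pvLookup item "pattern").isSome)) = true
instance (analysis : List (String × List (List (String × String)))) : Decidable (Pre_suggest_solutions analysis) := by unfold Pre_suggest_solutions; infer_instance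

def pvWitness_suggest_solutions : (List (String × List (List (String × String)))) :=
  [("error_patterns", [[("pattern", "Connection Timeout")]])]

def Spec_suggest_solutions (analysis : List (String × List (List (String × String)))) (out : List (List (String × String))) : Prop := out = suggest_solutions_alt analysis
instance (analysis : List (String × List (List (String × String)))) (out : List (List (String × String))) : Decidable (Spec_suggest_solutions analysis out) := by unfold Spec_suggest_solutions; infer_instance

-- ===== CLAIM =====
def Claim_equal_suggest_solutions : Prop := ∀ (analysis : List (String × List (List (String × String)))), Dom_suggest_solutions analysis → Pre_suggest_solutions analysis → Spec_suggest_solutions analysis (suggest_solutions analysis)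

-- ===== LEMMAS AND PROOFS =====

-- the three category conditions, without the truthiness conjunct
def pvC1 (pat : String) : Bool := PySem.Str.isIn "connect" pat || PySem.Str.isIn "timeout" pat
def pvC2 (pat : String) : Bool := PySem.Str.isIn "permission" pat || PySem.Str.isIn "denied" pat
def pvC3 (pat : String) : Bool :=
  PySem.Str.isIn "memory" pat || PySem.Str.isIn "cpu" pat || PySem.Str.isIn "disk" pat

def pvPat (item : List (String × String)) : String :=
  PySem.Str.lower ((pvLookup item "pattern").getD "")

-- the subset of {0,1,2} selected by the three flags, in increasing order
def pvSel (f1 f2 f3 : Bool) : List Int :=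
  (if f1 then [(0 : Int)] else []) ++ (if f2 then [1] else []) ++ (if f3 then [2] else [])

-- a nonempty keyword found inside pat forces pat nonempty
lemma pat_ne_of_isIn (kw pat : String) (h : kw ≠ "") (hi : PySem.Str.isIn kw pat = true) :
    (pat == "") = false := by
  rw [PySem.Str.isIn_iff_infix] at hi
  rcases hi with ⟨s, t, hst⟩
  cases hpat : (pat == "")
  · rfl
  · exfalso
    have hp : pat = "" := by exact eq_of_beq hpat
    subst hp
    simp at hst
    exact h hst.2.1

-- drop the truthiness conjunct when every satisfying pattern is nonempty anyway
lemma any_and_ne (patterns : List String) (c : String → Bool)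
    (h : ∀ p, c p = true → (p == "") = false) :
    patterns.any (fun p => c p && !(p == "")) = patterns.any c := by
  induction patterns with
  | nil => rfl
  | cons p ps ih =>
    simp only [List.any_cons, ih]
    cases hc : c p
    · simp
    · simp [h p hc]

lemma c1_ne (p : String) (hp : pvC1 p = true) : (p == "") = false := by
  rw [pvC1, Bool.or_eq_true] at hp
  rcases hp with h | h
  · exact pat_ne_of_isIn _ p (by decide) h
  · exact pat_ne_of_isIn _ p (by decide) h

lemma c2_ne (p : String) (hp : pvC2 p = true) : (p == "") = false := by
  rw [pvC2, Bool.or_eq_true] at hp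
  rcases hp with h | h
  · exact pat_ne_of_isIn _ p (by decide) h
  · exact pat_ne_of_isIn _ p (by decide) h

lemma c3_ne (p : String) (hp : pvC3 p = true) : (p == "") = false := by
  rw [pvC3, Bool.or_eq_true, Bool.or_eq_true] at hp
  rcases hp with (h | h) | h
  · exact pat_ne_of_isIn _ p (by decide) h
  · exact pat_ne_of_isIn _ p (by decide) h
  · exact pat_ne_of_isIn _ p (by decide) h

lemma cond1_eq (ps : List String) :
    ps.any (fun pat =>
      (PySem.Str.isIn "connect" pat || PySem.Str.isIn "timeout" pat) && !(pat == ""))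
    = ps.any pvC1 := any_and_ne ps pvC1 c1_ne

lemma cond2_eq (ps : List String) :
    ps.any (fun pat =>
      (PySem.Str.isIn "permission" pat || PySem.Str.isIn "denied" pat) && !(pat == ""))
    = ps.any pvC2 := any_and_ne ps pvC2 c2_ne

lemma cond3_eq (ps : List String) :
    ps.any (fun pat =>
      (PySem.Str.isIn "memory" pat || PySem.Str.isIn "cpu" pat || PySem.Str.isIn "disk" pat)
        && !(pat == ""))
    = ps.any pvC3 := any_and_ne ps pvC3 c3_ne

-- generic: membership in a keyword-table fold of Set.add
lemma mem_fold_add (ks : List (String × Int)) (m : PySem.Set Int) (pat : String) (x : Int) :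
    (x ∈ ks.foldl (fun m kp => if PySem.Str.isIn kp.1 pat then PySem.Set.add m kp.2 else m) m)
      ↔ x ∈ m ∨ ∃ kp ∈ ks, PySem.Str.isIn kp.1 pat = true ∧ x = kp.2 := by
  induction ks generalizing m with
  | nil => simp
  | cons k ks ih =>
    simp only [List.foldl_cons]
    by_cases hk : PySem.Str.isIn k.1 pat = true
    · rw [if_pos hk, ih]
      simp only [PySem.Set.mem_add, List.mem_cons]
      constructor
      · rintro ((h | rfl) | ⟨kp, hkp, h1, h2⟩)
        · exact Or.inl h
        · exact Or.inr ⟨k, Or.inl rfl, hk, rfl⟩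
        · exact Or.inr ⟨kp, Or.inr hkp, h1, h2⟩
      · rintro (h | ⟨kp, rfl | hkp, h1, h2⟩)
        · exact Or.inl (Or.inl h)
        · exact Or.inl (Or.inr h2)
        · exact Or.inr ⟨kp, hkp, h1, h2⟩
    · rw [if_neg hk, ih]
      simp only [List.mem_cons]
      constructor
      · rintro (h | ⟨kp, hkp, h1, h2⟩)
        · exact Or.inl h
        · exact Or.inr ⟨kp, Or.inr hkp, h1, h2⟩
      · rintro (h | ⟨kp, rfl | hkp, h1, h2⟩)
        · exact Or.inl h
        · exact absurd h1 hk
        · exact Or.inr ⟨kp, hkp, h1, h2⟩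

lemma nodup_fold_add (ks : List (String × Int)) (m : PySem.Set Int) (pat : String)
    (hm : m.Nodup) :
    (ks.foldl (fun m kp => if PySem.Str.isIn kp.1 pat then PySem.Set.add m kp.2 else m) m).Nodup := by
  induction ks generalizing m with
  | nil => exact hm
  | cons k ks ih =>
    simp only [List.foldl_cons]
    by_cases hk : PySem.Str.isIn k.1 pat = true
    · simp only [hk, if_true]
      exact ih _ (PySem.Set.nodup_add _ _ hm)
    · rw [if_neg hk]
      exact ih _ hm

-- membership in one inner-loop step of B (the 7-keyword table)
lemma mem_step (m : PySem.Set Int) (pat : String) (x : Int) :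
    (x ∈ pvKeywords.foldl
        (fun m kp => if PySem.Str.isIn kp.1 pat then PySem.Set.add m kp.2 else m) m)
      ↔ x ∈ m ∨ (x = 0 ∧ pvC1 pat) ∨ (x = 1 ∧ pvC2 pat) ∨ (x = 2 ∧ pvC3 pat) := by
  rw [mem_fold_add]
  simp only [pvKeywords, List.mem_cons, List.not_mem_nil, pvC1, pvC2, pvC3, Bool.or_eq_true]
  constructor
  · rintro (h | ⟨kp, hkp, hin, rfl⟩)
    · exact Or.inl h
    · rcases hkp with rfl | rfl | rfl | rfl | rfl | rfl | rfl | h'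
      · exact Or.inr (Or.inl ⟨rfl, Or.inl hin⟩)
      · exact Or.inr (Or.inl ⟨rfl, Or.inr hin⟩)
      · exact Or.inr (Or.inr (Or.inl ⟨rfl, Or.inl hin⟩))
      · exact Or.inr (Or.inr (Or.inl ⟨rfl, Or.inr hin⟩))
      · exact Or.inr (Or.inr (Or.inr ⟨rfl, Or.inl (Or.inl hin)⟩))
      · exact Or.inr (Or.inr (Or.inr ⟨rfl, Or.inl (Or.inr hin)⟩))
      · exact Or.inr (Or.inr (Or.inr ⟨rfl, Or.inr hin⟩))
      · cases h'
  · rintro (h | ⟨rfl, hin | hin⟩ | ⟨rfl, hin | hin⟩ | ⟨rfl, (hin | hin) | hin⟩)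
    · exact Or.inl h
    · exact Or.inr ⟨("connect", 0), by simp, hin, rfl⟩
    · exact Or.inr ⟨("timeout", 0), by simp, hin, rfl⟩
    · exact Or.inr ⟨("permission", 1), by simp, hin, rfl⟩
    · exact Or.inr ⟨("denied", 1), by simp, hin, rfl⟩
    · exact Or.inr ⟨("memory", 2), by simp, hin, rfl⟩
    · exact Or.inr ⟨("cpu", 2), by simp, hin, rfl⟩
    · exact Or.inr ⟨("disk", 2), by simp, hin, rfl⟩

lemma nodup_step (m : PySem.Set Int) (pat : String) (hm : m.Nodup) :
    (pvKeywords.foldl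
        (fun m kp => if PySem.Str.isIn kp.1 pat then PySem.Set.add m kp.2 else m) m).Nodup :=
  nodup_fold_add _ _ _ hm

-- membership in B's matched set after the whole pass over the items
lemma mem_matched (items : List (List (String × String))) (m : PySem.Set Int) (x : Int) :
    (x ∈ items.foldl (fun m item =>
        pvKeywords.foldl
          (fun m kp => if PySem.Str.isIn kp.1 (pvPat item) then PySem.Set.add m kp.2 else m) m) m)
      ↔ x ∈ m ∨ (x = 0 ∧ (items.map pvPat).any pvC1)
             ∨ (x = 1 ∧ (items.map pvPat).any pvC2)
             ∨ (x = 2 ∧ (items.map pvPat).any pvC3) := by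
  induction items generalizing m with
  | nil => simp
  | cons it its ih =>
    simp only [List.foldl_cons, List.map_cons, List.any_cons, ih, mem_step, Bool.or_eq_true]
    generalize pvC1 (pvPat it) = b1
    generalize pvC2 (pvPat it) = b2
    generalize pvC3 (pvPat it) = b3
    generalize (its.map pvPat).any pvC1 = a1
    generalize (its.map pvPat).any pvC2 = a2
    generalize (its.map pvPat).any pvC3 = a3
    tauto

lemma nodup_matched (items : List (List (String × String))) (m : PySem.Set Int) (hm : m.Nodup) :
    (items.foldl (fun m item =>
        pvKeywords.foldl
          (fun m kp => if PySem.Str.isIn kp.1 (pvPat item) then PySem.Set.add m kp.2 else m) m) m).Nodup := by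
  induction items generalizing m with
  | nil => exact hm
  | cons it its ih => exact ih _ (nodup_step _ _ hm)

lemma mem_pvSel (f1 f2 f3 : Bool) (x : Int) :
    x ∈ pvSel f1 f2 f3 ↔ (x = 0 ∧ f1) ∨ (x = 1 ∧ f2) ∨ (x = 2 ∧ f3) := by
  cases f1 <;> cases f2 <;> cases f3 <;> simp [pvSel]

lemma pairwise_pvSel (f1 f2 f3 : Bool) : (pvSel f1 f2 f3).Pairwise (· < ·) := by
  cases f1 <;> cases f2 <;> cases f3 <;> decide

lemma nodup_pvSel (f1 f2 f3 : Bool) : (pvSel f1 f2 f3).Nodup := by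
  cases f1 <;> cases f2 <;> cases f3 <;> decide

-- B evaluated against a named strictly increasing enumeration of matched
lemma alt_eval (analysis : List (String × List (List (String × String)))) (L : List Int)
    (hperm : L.Perm
      (((pvLookup analysis "error_patterns").getD []).foldl (fun m item =>
        pvKeywords.foldl
          (fun m kp => if PySem.Str.isIn kp.1 (pvPat item) then PySem.Set.add m kp.2 else m) m)
        PySem.Set.empty))
    (hlt : L.Pairwise (· < ·)) :
    suggest_solutions_alt analysis =
      if L.isEmpty then [pvUncat]
      else L.map (fun i => (PySem.List.pyGet? pvSolutions i).getD []) := by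
  simp only [suggest_solutions_alt, pvPat] at *
  have hs : PySem.List.sorted
      (((pvLookup analysis "error_patterns").getD []).foldl (fun m item =>
        pvKeywords.foldl
          (fun m kp => if PySem.Str.isIn kp.1
            (PySem.Str.lower ((pvLookup item "pattern").getD "")) then PySem.Set.add m kp.2 else m) m)
        PySem.Set.empty) (fun x : Int => x) false = L :=
    PySem.List.sorted_eq_of_perm_of_pairwise_lt _ _ _ hperm hlt
  rw [hs]
  have hemp : (((pvLookup analysis "error_patterns").getD []).foldl (fun m item =>
      pvKeywords.foldl
        (fun m kp => if PySem.Str.isIn kp.1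
          (PySem.Str.lower ((pvLookup item "pattern").getD "")) then PySem.Set.add m kp.2 else m) m)
      PySem.Set.empty).isEmpty = L.isEmpty := by
    cases hL : L.isEmpty with
    | false =>
      rw [Bool.eq_false_iff] at hL ⊢
      intro h
      rw [List.isEmpty_iff] at h
      exact hL (by rw [List.isEmpty_iff]; exact (h ▸ hperm).eq_nil)
    | true =>
      rw [List.isEmpty_iff] at hL
      subst hL
      rw [List.isEmpty_iff]
      exact hperm.nil_eq.symm
  rw [hemp]
  cases L.isEmpty <;> simp

-- ===== VERDICT =====
theorem suggest_solutions_spec : Claim_equal_suggest_solutions := by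
  intro analysis _ _
  show suggest_solutions analysis = suggest_solutions_alt analysis
  have hperm : (pvSel ((((pvLookup analysis "error_patterns").getD []).map pvPat).any pvC1)
      ((((pvLookup analysis "error_patterns").getD []).map pvPat).any pvC2)
      ((((pvLookup analysis "error_patterns").getD []).map pvPat).any pvC3)).Perm
      (((pvLookup analysis "error_patterns").getD []).foldl (fun m item =>
        pvKeywords.foldl
          (fun m kp => if PySem.Str.isIn kp.1 (pvPat item) then PySem.Set.add m kp.2 else m) m)
        PySem.Set.empty) := by
    refine ((List.perm_ext_iff_of_nodup (nodup_pvSel _ _ _)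
      (nodup_matched _ _ List.nodup_nil)).2 ?_)
    intro x
    rw [mem_pvSel, mem_matched]
    simp
  rw [alt_eval analysis _ hperm (pairwise_pvSel _ _ _)]
  simp only [suggest_solutions]
  rw [show (fun item => PySem.Str.lower ((pvLookup item "pattern").getD "")) = pvPat from rfl]
  rw [cond1_eq, cond2_eq, cond3_eq]
  cases (((pvLookup analysis "error_patterns").getD []).map pvPat).any pvC1 <;>
  cases (((pvLookup analysis "error_patterns").getD []).map pvPat).any pvC2 <;>
  cases (((pvLookup analysis "error_patterns").getD []).map pvPat).any pvC3 <;>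
    simp [pvSel, pvSolutions, PySem.List.pyGet?, PySem.List.pyIdx?]
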